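-- pv_equiv track=rewrite | github.com/Kuuhakuu001/100_day_from_zero_to_hero_python | day6.py | zero_pad
-- ===== SOURCE A (Python) =====
-- def zero_pad(matrix, pad):
--     padded_matrix = []
--     row_length = len(matrix[0]) + 2 * pad
--     for _ in range(pad):
--         padded_matrix.append([0] * row_length)
--
--     for row in matrix:
--         padded_matrix.append([0] * pad + row + [0] * pad)
--
--     for _ in range(pad):
--         padded_matrix.append([0] * row_length)
--
--     return padded_matrix
-- ===== SOURCE B (Python) =====
-- def zero_pad(matrix, pad):
--     # per-cell index construction: each output row is computed from its index,
--     # border rows directly, middle rows by a per-column comprehension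
--     border_w = len(matrix[0]) + 2 * pad
--     n = len(matrix)
--     out = []
--     for j in range(n + 2 * pad):
--         if j < pad or j >= pad + n:
--             out.append([0] * border_w)
--         else:
--             row = matrix[j - pad]
--             out.append([0 if k < pad or k >= pad + len(row) else row[k - pad]
--                         for k in range(len(row) + 2 * pad)])
--     return out
-- ===== Notes on version B (the rewrite author's own statement) =====
-- stated objective: alternative
-- what changed: Replaces A's three sequential append passes (top border loop, per-row wrap via list concatenation, bottom border loop) with a single loop over output row indices that computes each row from its index, building middle rows cell-by-cell from the column index; per-row lengths are honored so ragged matrices keep A's widths. Pre_ excludes the empty matrix (A raises IndexError at matrix[0]) and negative pad, an unspecified corner where A's identity-copy result is an accident of Python's negative list replication and B's truncated grid is equally unspecified.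
-- outside the precondition, e.g. on zero_pad([[1, 2]], -1): A returns [[1, 2]], B returns []
import Mathlib
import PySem

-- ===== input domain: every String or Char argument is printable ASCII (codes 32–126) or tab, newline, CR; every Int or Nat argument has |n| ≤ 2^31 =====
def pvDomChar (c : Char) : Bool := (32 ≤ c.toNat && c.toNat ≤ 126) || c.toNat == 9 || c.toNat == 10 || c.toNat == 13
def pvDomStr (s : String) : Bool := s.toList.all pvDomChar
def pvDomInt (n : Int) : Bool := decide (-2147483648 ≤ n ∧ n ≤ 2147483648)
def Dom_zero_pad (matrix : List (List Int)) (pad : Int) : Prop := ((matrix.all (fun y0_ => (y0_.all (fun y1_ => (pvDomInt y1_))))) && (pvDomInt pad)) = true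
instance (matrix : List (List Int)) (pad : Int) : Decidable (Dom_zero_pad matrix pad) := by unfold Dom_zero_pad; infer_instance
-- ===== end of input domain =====

-- B replaces A's three append passes by a per-cell index construction (each output
-- row computed from its row index, middle cells from their column index); objective:
-- alternative decomposition, same cost.

-- ===== PORT A =====
-- A: row_length from matrix[0] (IndexError on empty matrix — excluded by Pre_),
-- then three append loops: top border, wrapped rows, bottom border.
def zero_pad (matrix : List (List Int)) (pad : Int) : List (List Int) :=
  let padded0 : List (List Int) := []
  let row_length : Int := (((PySem.List.pyGet? matrix 0).getD []).length : Int) + 2 * pad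
  let padded1 := (PySem.List.pyRange 0 pad 1).foldl
    (fun acc _ => acc ++ [List.replicate row_length.toNat (0 : Int)]) padded0
  let padded2 := matrix.foldl
    (fun acc row => acc ++ [List.replicate pad.toNat (0 : Int) ++ row ++ List.replicate pad.toNat (0 : Int)]) padded1
  (PySem.List.pyRange 0 pad 1).foldl
    (fun acc _ => acc ++ [List.replicate row_length.toNat (0 : Int)]) padded2

-- ===== PORT B =====
-- B: one loop over output row indices; border rows built directly, middle rows by a
-- per-column comprehension.  matrix[0] (resp. matrix[j-pad], row[k-pad]) via pyGet?;
-- the .getD defaults are never reached inside Pre_.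
def zero_pad_alt (matrix : List (List Int)) (pad : Int) : List (List Int) :=
  let border_w : Int := (((PySem.List.pyGet? matrix 0).getD []).length : Int) + 2 * pad
  let n : Int := matrix.length
  (PySem.List.pyRange 0 (n + 2 * pad) 1).foldl (fun out j =>
    out ++ [if j < pad ∨ pad + n ≤ j then List.replicate border_w.toNat (0 : Int)
            else
              let row := (PySem.List.pyGet? matrix (j - pad)).getD []
              (PySem.List.pyRange 0 ((row.length : Int) + 2 * pad) 1).map
                (fun k => if k < pad ∨ pad + (row.length : Int) ≤ k then (0 : Int)
                          else (PySem.List.pyGet? row (k - pad)).getD 0)]) []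

-- ===== PRECONDITION & SPEC =====
-- Pre_ excludes the empty matrix, on which A raises IndexError at matrix[0], and
-- negative pad, an unspecified corner: there A's identity-copy result is an accident
-- of Python's negative list replication and B's truncated grid is equally unspecified.
def Pre_zero_pad (matrix : List (List Int)) (pad : Int) : Prop := matrix ≠ [] ∧ 0 ≤ pad
instance (matrix : List (List Int)) (pad : Int) : Decidable (Pre_zero_pad matrix pad) := by unfold Pre_zero_pad; infer_instance
def pvWitness_zero_pad : List (List Int) × Int := ([[1, 2], [3, 4]], 1)
def Spec_zero_pad (matrix : List (List Int)) (pad : Int) (out : List (List Int)) : Prop := out = zero_pad_alt matrix pad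
instance (matrix : List (List Int)) (pad : Int) (out : List (List Int)) : Decidable (Spec_zero_pad matrix pad out) := by unfold Spec_zero_pad; infer_instance

-- ===== CLAIM (what is proved, stated in full; the proofs are below) =====
def Claim_equal_zero_pad : Prop := ∀ (matrix : List (List Int)) (pad : Int), Dom_zero_pad matrix pad → Pre_zero_pad matrix pad → Spec_zero_pad matrix pad (zero_pad matrix pad)

-- ===== LEMMAS AND PROOFS =====

-- the common canonical value: pad border rows, the wrapped rows, pad border rows
def pvWrap (P : Nat) (row : List Int) : List Int :=
  List.replicate P 0 ++ row ++ List.replicate P 0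

def pvBorder (matrix : List (List Int)) (pad : Int) : List Int :=
  List.replicate ((((PySem.List.pyGet? matrix 0).getD []).length : Int) + 2 * pad).toNat 0

def pvCanon (matrix : List (List Int)) (pad : Int) : List (List Int) :=
  List.replicate pad.toNat (pvBorder matrix pad)
    ++ matrix.map (pvWrap pad.toNat)
    ++ List.replicate pad.toNat (pvBorder matrix pad)

lemma map_range_getD {α β : Type} (l : List α) (f : α → β) (d : α) :
    (List.range l.length).map (fun i => f (l.getD i d)) = l.map f := by
  apply List.ext_getElem
  · simp
  · intro i h1 h2
    simp at h1 h2
    rw [List.getElem_map, List.getElem_range, List.getElem_map,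
        List.getD_eq_getElem?_getD, List.getElem?_eq_getElem h1]
    rfl

lemma zero_pad_eq_canon (matrix : List (List Int)) (pad : Int) :
    zero_pad matrix pad = pvCanon matrix pad := by
  unfold zero_pad pvCanon pvBorder pvWrap
  rw [PySem.List.foldl_append_singleton_eq_map, PySem.List.foldl_append_singleton_eq_map,
      PySem.List.foldl_append_singleton_eq_map]
  have hb : (PySem.List.pyRange 0 pad 1).map
      (fun _ => List.replicate ((((PySem.List.pyGet? matrix 0).getD []).length : Int) + 2 * pad).toNat (0 : Int))
      = List.replicate pad.toNat
          (List.replicate ((((PySem.List.pyGet? matrix 0).getD []).length : Int) + 2 * pad).toNat (0 : Int)) := by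
    rw [List.map_const', PySem.List.length_pyRange_one]
    norm_num
  rw [hb, List.nil_append, List.append_assoc]

-- the inner comprehension of B produces exactly a wrapped row
lemma inner_eq_wrap (row : List Int) (P : Nat) :
    (PySem.List.pyRange 0 ((row.length : Int) + 2 * (P : Int)) 1).map
        (fun k => if k < (P : Int) ∨ (P : Int) + (row.length : Int) ≤ k then (0 : Int)
                  else (PySem.List.pyGet? row (k - (P : Int))).getD 0)
      = pvWrap P row := by
  rw [PySem.List.pyRange_one_append 0 (P : Int) ((row.length : Int) + 2 * (P : Int))
        (by positivity) (by omega),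
      PySem.List.pyRange_one_append (P : Int) ((P : Int) + (row.length : Int))
        ((row.length : Int) + 2 * (P : Int)) (by omega) (by omega)]
  have h1 : (PySem.List.pyRange 0 (P : Int) 1).map
      (fun k => if k < (P : Int) ∨ (P : Int) + (row.length : Int) ≤ k then (0 : Int)
                else (PySem.List.pyGet? row (k - (P : Int))).getD 0)
      = List.replicate P (0 : Int) := by
    rw [List.map_congr_left (g := fun _ => (0 : Int))
        (fun x hx => by
          rcases PySem.List.mem_pyRange_one.mp hx with ⟨_, hlt⟩
          simp [if_pos (Or.inl hlt)])]
    simp [List.map_const', PySem.List.length_pyRange_one]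
  have h3 : (PySem.List.pyRange ((P : Int) + (row.length : Int))
        ((row.length : Int) + 2 * (P : Int)) 1).map
      (fun k => if k < (P : Int) ∨ (P : Int) + (row.length : Int) ≤ k then (0 : Int)
                else (PySem.List.pyGet? row (k - (P : Int))).getD 0)
      = List.replicate P (0 : Int) := by
    rw [List.map_congr_left (g := fun _ => (0 : Int))
        (fun x hx => by
          rcases PySem.List.mem_pyRange_one.mp hx with ⟨hge, _⟩
          simp [if_pos (Or.inr hge)])]
    have : (((row.length : Int) + 2 * (P : Int)) - ((P : Int) + (row.length : Int))).toNat = P := by omega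
    simp [List.map_const', PySem.List.length_pyRange_one, this]
  have h2 : (PySem.List.pyRange (P : Int) ((P : Int) + (row.length : Int)) 1).map
      (fun k => if k < (P : Int) ∨ (P : Int) + (row.length : Int) ≤ k then (0 : Int)
                else (PySem.List.pyGet? row (k - (P : Int))).getD 0)
      = row := by
    rw [PySem.List.pyRange_one]
    have hlen : (((P : Int) + (row.length : Int)) - (P : Int)).toNat = row.length := by omega
    rw [hlen, List.map_map]
    have : ((fun k => if k < (P : Int) ∨ (P : Int) + (row.length : Int) ≤ k then (0 : Int)
                      else (PySem.List.pyGet? row (k - (P : Int))).getD 0)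
            ∘ fun (k : Nat) => (P : Int) + (k : Int))
        = fun (i : Nat) => if (i : Int) < 0 ∨ (row.length : Int) ≤ (i : Int) then (0 : Int)
                           else (PySem.List.pyGet? row (i : Int)).getD 0 := by
      funext i
      simp only [Function.comp]
      have e1 : ((P : Int) + (i : Int) < (P : Int) ∨ (P : Int) + (row.length : Int) ≤ (P : Int) + (i : Int))
          ↔ ((i : Int) < 0 ∨ (row.length : Int) ≤ (i : Int)) := by omega
      rw [if_congr e1 rfl rfl]
      have e2 : (P : Int) + (i : Int) - (P : Int) = ((i : Nat) : Int) := by omega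
      rw [e2]
    rw [this]
    have : (fun (i : Nat) => if (i : Int) < 0 ∨ (row.length : Int) ≤ (i : Int) then (0 : Int)
                             else (PySem.List.pyGet? row (i : Int)).getD 0)
        = fun (i : Nat) => (fun v => v) (row.getD i 0) := by
      funext i
      by_cases hi : i < row.length
      · rw [if_neg (by omega)]
        rw [PySem.List.pyGet?_natCast]
        simp [List.getD_eq_getElem?_getD]
      · rw [if_pos (Or.inr (by omega))]
        rw [List.getD_eq_getElem?_getD, List.getElem?_eq_none (Nat.le_of_not_lt hi)]
        rfl
    rw [this, map_range_getD row (fun v => v) 0, List.map_id']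
  rw [List.map_append, List.map_append, h1, h2, h3, pvWrap, List.append_assoc]

lemma zero_pad_alt_eq_canon (matrix : List (List Int)) (pad : Int) (hpad : 0 ≤ pad) :
    zero_pad_alt matrix pad = pvCanon matrix pad := by
  obtain ⟨P, rfl⟩ := Int.eq_ofNat_of_zero_le hpad
  have hn0 : (0 : Int) ≤ (matrix.length : Int) := by positivity
  unfold zero_pad_alt
  rw [PySem.List.foldl_append_singleton_eq_map, List.nil_append]
  rw [PySem.List.pyRange_one_append 0 (P : Int) ((matrix.length : Int) + 2 * (P : Int))
        (by positivity) (by omega),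
      PySem.List.pyRange_one_append (P : Int) ((P : Int) + (matrix.length : Int))
        ((matrix.length : Int) + 2 * (P : Int)) (by omega) (by omega),
      List.map_append, List.map_append]
  unfold pvCanon
  rw [List.append_assoc]
  congr 1
  · calc _ = (PySem.List.pyRange 0 (P : Int) 1).map (fun _ => pvBorder matrix (P : Int)) :=
          List.map_congr_left (fun x hx => by
            rcases PySem.List.mem_pyRange_one.mp hx with ⟨_, hlt⟩
            simp only []
            rw [if_pos (Or.inl hlt)]
            rfl)
      _ = _ := by
          rw [List.map_const', PySem.List.length_pyRange_one]
          congr 1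
  congr 1
  · calc _ = (PySem.List.pyRange (P : Int) ((P : Int) + (matrix.length : Int)) 1).map
          (fun j => pvWrap P (matrix.getD (j - (P : Int)).toNat [])) := by
          refine List.map_congr_left (fun x hx => ?_)
          rcases PySem.List.mem_pyRange_one.mp hx with ⟨hge, hlt⟩
          have hidx : (x - (P : Int)).toNat < matrix.length := by omega
          rw [if_neg (by omega)]
          simp only []
          have e : x - (P : Int) = (((x - (P : Int)).toNat : Nat) : Int) := by omega
          rw [e, PySem.List.pyGet?_natCast, List.getElem?_eq_getElem hidx]
          simp only [Option.getD_some]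
          rw [inner_eq_wrap matrix[(x - (P : Int)).toNat] P]
          congr 1
          rw [List.getD_eq_getElem?_getD]
          simp only [Int.toNat_natCast]
          rw [List.getElem?_eq_getElem hidx]
          rfl
      _ = _ := by
          rw [PySem.List.pyRange_one]
          have hlen : (((P : Int) + (matrix.length : Int)) - (P : Int)).toNat = matrix.length := by omega
          rw [hlen, List.map_map]
          rw [List.map_congr_left (g := fun (i : Nat) => pvWrap P (matrix.getD i []))
              (fun i _ => by
                simp only [Function.comp]
                rw [show (((P : Int) + (i : Int)) - (P : Int)).toNat = i from by omega])]
          have := map_range_getD matrix (pvWrap P) []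
          rw [this]
          congr 1
  · calc _ = (PySem.List.pyRange ((P : Int) + (matrix.length : Int))
          ((matrix.length : Int) + 2 * (P : Int)) 1).map (fun _ => pvBorder matrix (P : Int)) :=
          List.map_congr_left (fun x hx => by
            rcases PySem.List.mem_pyRange_one.mp hx with ⟨hge, _⟩
            simp only []
            rw [if_pos (Or.inr hge)]
            rfl)
      _ = _ := by
          rw [List.map_const', PySem.List.length_pyRange_one]
          congr 1
          omega

-- ===== VERDICT (by name: the statement is the Claim_ definition above) =====
theorem zero_pad_spec : Claim_equal_zero_pad := by
  intro matrix pad _ hpre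
  unfold Spec_zero_pad
  rw [zero_pad_eq_canon, zero_pad_alt_eq_canon matrix pad hpre.2]
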